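-- pv_equiv track=rewrite | github.com/Salmck/ColorfulRingsNumber | colorfulRingCal.py | check_minimum
-- ===== SOURCE A (Python) =====
-- def minimum_representation(s):
--     ss = s+s
--     i, j, k = 0, 1, 0
--     while i<len(s) and j < len(s) and k < len(s):
--         t = ord(ss[i+k]) - ord(ss[j+k])
--         if not t:
--             k += 1
--         else:
--             if t > 0:
--                 i += k + 1
--             else:
--                 j += k + 1
--             if i == j:
--                 j += 1
--             k = 0
--     i = min(i,j)
--     return i
--
-- def check_minimum(s):
--     x = minimum_representation(s)
--     if x:
--         return False
--     rs = s[::-1]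
--     rx = minimum_representation(rs)
--     l = len(s)
--     s = s + s
--     rs = rs + rs
--     for i in range(l):
--         t = ord(s[i+x]) - ord(rs[i+rx])
--         if t>0:
--             return False
--         if t<0:
--             return True
--     return True
-- ===== SOURCE B (Python) =====
-- def check_minimum(s):
--     # Brute-force re-implementation: compare s against the lexicographically
--     # minimal rotation of s and of its reversal, instead of Booth-style pointers.
--     n = len(s)
--     if n == 0:
--         return True
--     if s != min(s[i:] + s[:i] for i in range(n)):
--         return False
--     rs = s[::-1]
--     return s <= min(rs[i:] + rs[:i] for i in range(n))
-- ===== Notes on version B (the rewrite author's own statement) =====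
-- stated objective: simpler
-- what changed: Replaces Booth-style two-pointer minimal-rotation index computation and the manual character-by-character comparison loop with a direct brute-force minimum over all rotations and built-in string comparison.
import Mathlib
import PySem

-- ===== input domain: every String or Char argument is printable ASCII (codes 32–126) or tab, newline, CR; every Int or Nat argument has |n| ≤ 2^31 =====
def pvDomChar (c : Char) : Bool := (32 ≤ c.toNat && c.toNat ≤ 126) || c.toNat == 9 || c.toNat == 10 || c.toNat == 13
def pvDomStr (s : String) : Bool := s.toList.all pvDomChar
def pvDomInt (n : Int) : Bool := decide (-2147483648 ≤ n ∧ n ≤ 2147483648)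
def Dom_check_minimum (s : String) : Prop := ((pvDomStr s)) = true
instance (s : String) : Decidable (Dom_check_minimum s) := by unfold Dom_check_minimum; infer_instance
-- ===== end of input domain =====

-- B replaces A's Booth-style two-pointer minimal-rotation scan and manual compare loop
-- by a brute-force minimum over all rotations (simpler, not faster); return values agree on all inputs.


-- ===== PORT A =====
-- ord(c) for characters; exact on all of Unicode, in particular on the ASCII domain.
def pvOrd (c : Char) : Int := (c.toNat : Int)

-- the while-loop of A's minimum_representation; state (i, j, k), returns min i j at exit.
-- Each iteration increases i+j+k by at least 1 and the loop exits once any of i, j, k reaches n,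
-- so 3*n+1 steps of fuel always suffice: the fuel-exhausted branch is never reached (proved below).
def boothLoop (ss : List Char) (n : Nat) : Nat → Nat → Nat → Nat → Nat
  | 0, i, j, _k => min i j
  | fuel + 1, i, j, k =>
    if i < n ∧ j < n ∧ k < n then
      let t : Int := pvOrd (ss.getD (i + k) ' ') - pvOrd (ss.getD (j + k) ' ')
      if t = 0 then
        boothLoop ss n fuel i j (k + 1)
      else if t > 0 then
        -- i += k + 1; if i == j: j += 1; k = 0
        if i + k + 1 = j then boothLoop ss n fuel (i + k + 1) (j + 1) 0
        else boothLoop ss n fuel (i + k + 1) j 0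
      else
        -- j += k + 1; if i == j: j += 1; k = 0
        if i = j + k + 1 then boothLoop ss n fuel i (j + k + 2) 0
        else boothLoop ss n fuel i (j + k + 1) 0
    else
      min i j

def minimum_representation (l : List Char) : Nat :=
  boothLoop (l ++ l) l.length (3 * l.length + 1) 0 1 0

-- A's final for-loop: i runs over range(l), early returns on the first differing character
-- (fuel l suffices: the loop makes at most l steps).
def cmpLoop (ss rss : List Char) (x rx l : Nat) : Nat → Nat → Bool
  | 0, _i => true
  | fuel + 1, i =>
    if i < l then
      let t : Int := pvOrd (ss.getD (i + x) ' ') - pvOrd (rss.getD (i + rx) ' ')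
      if t > 0 then false
      else if t < 0 then true
      else cmpLoop ss rss x rx l fuel (i + 1)
    else true

def check_minimum (s : String) : Bool :=
  let ls := s.toList
  let x := minimum_representation ls
  if x ≠ 0 then false
  else
    let rs := ls.reverse          -- s[::-1], exact
    let rx := minimum_representation rs
    cmpLoop (ls ++ ls) (rs ++ rs) x rx ls.length ls.length 0

-- ===== PORT B =====
-- s[i:] + s[:i]
def rotAt (l : List Char) (i : Nat) : List Char := l.drop i ++ l.take i

-- Python's '<' on strings: lexicographic by code point (exact; Char '<' compares code points).
def lexLt : List Char → List Char → Bool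
  | [], [] => false
  | [], _ :: _ => true
  | _ :: _, [] => false
  | a :: as, b :: bs => if a < b then true else if b < a then false else lexLt as bs

-- Python's '<=' on strings (total order: a <= b iff not b < a).
def lexLe (a b : List Char) : Bool := ! lexLt b a

-- min(s[i:]+s[:i] for i in range(n)): builtin min ported as a fold keeping the first minimum.
def minRot (l : List Char) : List Char :=
  (List.range l.length).foldl
    (fun best i => if lexLt (rotAt l i) best then rotAt l i else best) l

def check_minimum_alt (s : String) : Bool :=
  let ls := s.toList
  if ls.length = 0 then true
  else if ls ≠ minRot ls then false
  else lexLe ls (minRot ls.reverse)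

-- ===== PRECONDITION & SPEC =====
def Spec_check_minimum (s : String) (out : Bool) : Prop := out = check_minimum_alt s
instance (s : String) (out : Bool) : Decidable (Spec_check_minimum s out) := by unfold Spec_check_minimum; infer_instance

-- ===== CLAIM (what is proved, stated in full; the proofs are below) =====
def Claim_equal_check_minimum : Prop := ∀ (s : String), Dom_check_minimum s → Spec_check_minimum s (check_minimum s)

-- ===== LEMMAS AND PROOFS =====

-- the circular character of l at position p (read modulo the length)
def cAt (l : List Char) (p : Nat) : Char := l.getD (p % l.length) ' '

-- index p is not the least index of the minimal rotation
def BadIdx (l : List Char) (p : Nat) : Prop :=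
  ∃ q < l.length, rotAt l q < rotAt l p ∨ (rotAt l q = rotAt l p ∧ q < p)

-- m is the least index whose rotation is lexicographically minimal
def LeastRot (l : List Char) (m : Nat) : Prop :=
  m < l.length ∧ (∀ p < l.length, rotAt l m ≤ rotAt l p) ∧ (∀ q < m, rotAt l m < rotAt l q)

-- Booth loop invariant
def BInv (l : List Char) (i j k : Nat) : Prop :=
  i ≠ j ∧ min i j < l.length ∧
  (∀ t < k, cAt l (i + t) = cAt l (j + t)) ∧
  (∀ p < max i j, p < l.length → p ≠ i → p ≠ j → BadIdx l p)

lemma cAt_congr_mod (l : List Char) {x y : Nat} (h : x % l.length = y % l.length) :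
    cAt l x = cAt l y := by simp [cAt, h]

lemma cAt_mod_add (l : List Char) (p u : Nat) : cAt l (p % l.length + u) = cAt l (p + u) := by
  exact cAt_congr_mod l (Nat.mod_add_mod p l.length u)

lemma getD_append_self (l : List Char) (q : Nat) (hq : q < 2 * l.length) :
    (l ++ l).getD q ' ' = cAt l q := by
  by_cases h : q < l.length
  · rw [List.getD_append _ _ _ _ h, cAt, Nat.mod_eq_of_lt h]
  · push_neg at h
    have hn : 0 < l.length := by omega
    rw [List.getD_append_right _ _ _ _ h, cAt, Nat.mod_eq_sub_mod h,
      Nat.mod_eq_of_lt (by omega)]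

lemma rot_length (l : List Char) (p : Nat) : (rotAt l p).length = l.length := by
  simp [rotAt]; omega

lemma rot_zero (l : List Char) : rotAt l 0 = l := by simp [rotAt]

lemma rot_getD (l : List Char) {p t : Nat} (hp : p < l.length) (ht : t < l.length) :
    (rotAt l p).getD t ' ' = cAt l (p + t) := by
  unfold rotAt cAt
  by_cases h : t < l.length - p
  · rw [Nat.mod_eq_of_lt (by omega)]
    rw [List.getD_append _ _ _ _ (by simp; omega)]
    rw [List.getD_eq_getElem _ _ (by simp; omega), List.getD_eq_getElem _ _ (by omega)]
    rw [List.getElem_drop]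
  · rw [Nat.mod_eq_sub_mod (by omega), Nat.mod_eq_of_lt (by omega)]
    rw [List.getD_append_right _ _ _ _ (by simp; omega)]
    rw [List.getD_eq_getElem _ _ (by simp; omega), List.getD_eq_getElem _ _ (by omega)]
    rw [List.getElem_take]
    apply getElem_congr rfl
    simp; omega

lemma lists_eq_of_getD {a b : List Char} (hlen : a.length = b.length)
    (h : ∀ u < a.length, a.getD u ' ' = b.getD u ' ') : a = b := by
  apply List.ext_getElem hlen
  intro i h1 h2
  have := h i h1
  rwa [List.getD_eq_getElem _ _ h1, List.getD_eq_getElem _ _ h2] at this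

lemma char_lt_iff (a b : Char) : a < b ↔ a.toNat < b.toNat := Iff.rfl

lemma char_eq_of_toNat_eq {a b : Char} (h : a.toNat = b.toNat) : a = b := by
  apply Char.eq_of_val_eq
  exact UInt32.toNat_inj.mp h

lemma lexLt_eq_decide (a b : List Char) : lexLt a b = decide (a < b) := by
  induction a generalizing b with
  | nil =>
    cases b with
    | nil => simp [lexLt]
    | cons b bs => simp [lexLt, List.nil_lt_cons]
  | cons a as ih =>
    cases b with
    | nil => simp [lexLt, List.not_lt_nil]
    | cons b bs =>
      simp only [lexLt, List.cons_lt_cons_iff]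
      rcases lt_trichotomy a b with h | h | h
      · simp [h]
      · subst h; simp [lt_self_iff_false, ih]
      · simp [h.not_gt, h.ne', h]

-- pointwise characterization of the list order on equal-length lists
lemma lt_iff_exists {a b : List Char} (hlen : a.length = b.length) :
    a < b ↔ ∃ t < a.length, (∀ u < t, a.getD u ' ' = b.getD u ' ') ∧ a.getD t ' ' < b.getD t ' ' := by
  induction a generalizing b with
  | nil =>
    have : b = [] := List.eq_nil_iff_length_eq_zero.mpr (by simpa using hlen.symm)
    subst this; simp [List.not_lt_nil]
  | cons a as ih =>
    cases b with
    | nil => simp at hlen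
    | cons b bs =>
      simp only [List.cons_lt_cons_iff]
      constructor
      · rintro (h | ⟨rfl, h⟩)
        · exact ⟨0, by simp, by omega, by simpa using h⟩
        · obtain ⟨t, ht, hag, hlt⟩ := (ih (by simpa using hlen)).mp h
          refine ⟨t + 1, by simp; omega, ?_, by simpa using hlt⟩
          intro u hu
          cases u with
          | zero => simp
          | succ u => simpa using hag u (by omega)
      · rintro ⟨t, ht, hag, hlt⟩
        cases t with
        | zero => left; simpa using hlt
        | succ t =>
          have hab : a = b := by simpa using hag 0 (by omega)
          subst hab
          right
          refine ⟨rfl, (ih (by simpa using hlen)).mpr ⟨t, by simp at ht; omega, ?_, by simpa using hlt⟩⟩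
          intro u hu
          simpa using hag (u + 1) (by omega)

-- elimination of a block of candidates [a, a+k] when rotation a loses to rotation b at offset k
lemma elim_block (l : List Char) (hn : 0 < l.length) {a b k : Nat}
    (hk : k < l.length)
    (hagree : ∀ t < k, cAt l (a + t) = cAt l (b + t))
    (hlt : cAt l (b + k) < cAt l (a + k)) :
    ∀ m ≤ k, a + m < l.length → BadIdx l (a + m) := by
  intro m hm hmn
  have hq : (b + m) % l.length < l.length := Nat.mod_lt _ hn
  refine ⟨(b + m) % l.length, hq, Or.inl ?_⟩
  rw [lt_iff_exists (by rw [rot_length, rot_length])]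
  rw [rot_length]
  refine ⟨k - m, by omega, ?_, ?_⟩
  · intro u hu
    rw [rot_getD l hq (by omega), rot_getD l hmn (by omega), cAt_mod_add]
    have e : b + m + u = b + (m + u) := by omega
    have e2 : a + m + u = a + (m + u) := by omega
    rw [e, e2]
    exact (hagree (m + u) (by omega)).symm
  · rw [rot_getD l hq (by omega), rot_getD l hmn (by omega), cAt_mod_add]
    have e : b + m + (k - m) = b + k := by omega
    have e2 : a + m + (k - m) = a + k := by omega
    rw [e, e2]
    exact hlt

lemma fold_min_le (l : List Char) : ∀ (xs : List Nat) (init : List Char),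
    (xs.foldl (fun best i => if lexLt (rotAt l i) best then rotAt l i else best) init) ≤ init ∧
    ∀ i ∈ xs, (xs.foldl (fun best i => if lexLt (rotAt l i) best then rotAt l i else best) init) ≤ rotAt l i := by
  intro xs
  induction xs with
  | nil => intro init; simp
  | cons x xs ih =>
    intro init
    simp only [List.foldl_cons]
    have h1 : (if lexLt (rotAt l x) init then rotAt l x else init) ≤ init ∧
        (if lexLt (rotAt l x) init then rotAt l x else init) ≤ rotAt l x := by
      rw [lexLt_eq_decide]
      by_cases h : rotAt l x < init
      · simp [h]; exact h.le
      · simp [h]; exact le_of_not_gt h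
    obtain ⟨ha, hb⟩ := ih (if lexLt (rotAt l x) init then rotAt l x else init)
    refine ⟨ha.trans h1.1, ?_⟩
    intro i hi
    rcases List.mem_cons.mp hi with rfl | hi
    · exact ha.trans h1.2
    · exact hb i hi

lemma fold_min_mem (l : List Char) : ∀ (xs : List Nat) (init : List Char),
    (xs.foldl (fun best i => if lexLt (rotAt l i) best then rotAt l i else best) init) = init ∨
    ∃ i ∈ xs, (xs.foldl (fun best i => if lexLt (rotAt l i) best then rotAt l i else best) init) = rotAt l i := by
  intro xs
  induction xs with
  | nil => intro init; simp
  | cons x xs ih =>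
    intro init
    simp only [List.foldl_cons]
    rcases ih (if lexLt (rotAt l x) init then rotAt l x else init) with h | ⟨i, hi, h⟩
    · by_cases hx : lexLt (rotAt l x) init = true
      · right; exact ⟨x, List.mem_cons_self, by rw [h, if_pos hx]⟩
      · left; rw [h, if_neg hx]
    · right; exact ⟨i, List.mem_cons_of_mem _ hi, h⟩

lemma minRot_le (l : List Char) {i : Nat} (hi : i < l.length) : minRot l ≤ rotAt l i := by
  exact (fold_min_le l (List.range l.length) l).2 i (List.mem_range.mpr hi)

lemma minRot_mem (l : List Char) : minRot l = l ∨ ∃ i < l.length, minRot l = rotAt l i := by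
  rcases fold_min_mem l (List.range l.length) l with h | ⟨i, hi, h⟩
  · exact Or.inl h
  · exact Or.inr ⟨i, List.mem_range.mp hi, h⟩

lemma exists_leastRot (l : List Char) (hn : 0 < l.length) : ∃ m, LeastRot l m := by
  have hex : ∃ m, m < l.length ∧ rotAt l m = minRot l := by
    rcases minRot_mem l with h | ⟨i, hi, h⟩
    · exact ⟨0, hn, by rw [rot_zero, h]⟩
    · exact ⟨i, hi, h.symm⟩
  obtain ⟨hmlt, hmeq⟩ := Nat.find_spec hex
  refine ⟨Nat.find hex, hmlt, ?_, ?_⟩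
  · intro p hp; rw [hmeq]; exact minRot_le l hp
  · intro q hq
    have hle : rotAt l (Nat.find hex) ≤ rotAt l q := by
      rw [hmeq]; exact minRot_le l (by omega)
    rcases hle.lt_or_eq with h | h
    · exact h
    · exact absurd ⟨by omega, by rw [← h, hmeq]⟩ (Nat.find_min hex hq)

lemma leastRot_not_bad {l : List Char} {m : Nat} (h : LeastRot l m) : ¬ BadIdx l m := by
  rintro ⟨q, hq, hcase | ⟨heq, hlt⟩⟩
  · exact absurd hcase (not_lt.mpr (h.2.1 q hq))
  · have := h.2.2 q hlt
    rw [heq] at this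
    exact lt_irrefl _ this

lemma leastRot_unique {l : List Char} {m m' : Nat} (h : LeastRot l m) (h' : LeastRot l m') :
    m = m' := by
  by_contra hne
  rcases Nat.lt_or_ge m m' with hlt | hge
  · exact absurd (h'.2.2 m hlt) (not_lt.mpr (h.2.1 m' h'.1))
  · exact absurd (h.2.2 m' (by omega)) (not_lt.mpr (h'.2.1 m h.1))

-- the circular string is invariant under shift by d if two full rotations agree
lemma booth_exit (l : List Char) (hn : 0 < l.length) {i j k : Nat} (hinv : BInv l i j k)
    (hexit : ¬(i < l.length ∧ j < l.length ∧ k < l.length)) : LeastRot l (min i j) := by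
  obtain ⟨m, hm⟩ := exists_leastRot l hn
  have hm1 : m < l.length := hm.1
  suffices h : min i j = m by rw [h]; exact hm
  obtain ⟨hne, hmin, hagree, hD⟩ := hinv
  have hnb := leastRot_not_bad hm
  by_cases hi : i < l.length
  · by_cases hj : j < l.length
    · -- exit with k ≥ n: the two full rotations agree
      have hk : l.length ≤ k := by omega
      have hij : ∀ t < l.length, cAt l (i + t) = cAt l (j + t) := fun t ht => hagree t (by omega)
      have hmm : ∀ t < l.length, cAt l (min i j + t) = cAt l (max i j + t) := by
        intro t ht
        rcases le_total i j with h' | h'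
        · rw [min_eq_left h', max_eq_right h']; exact hij t ht
        · rw [min_eq_right h', max_eq_left h']; exact (hij t ht).symm
      set d := max i j - min i j with hd
      have hdpos : 0 < d := by omega
      have hshift : ∀ q, cAt l (q + d) = cAt l q := by
        intro q
        have ht : (q + l.length - min i j) % l.length < l.length := Nat.mod_lt _ hn
        have a1 := hmm _ ht
        have e1 : cAt l (min i j + (q + l.length - min i j) % l.length) = cAt l q := by
          apply cAt_congr_mod
          calc (min i j + (q + l.length - min i j) % l.length) % l.length
              = (min i j + (q + l.length - min i j)) % l.length := Nat.add_mod_mod _ _ _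
            _ = (q + l.length) % l.length := by congr 1; omega
            _ = q % l.length := Nat.add_mod_right q l.length
        have e2 : cAt l (max i j + (q + l.length - min i j) % l.length) = cAt l (q + d) := by
          apply cAt_congr_mod
          calc (max i j + (q + l.length - min i j) % l.length) % l.length
              = (max i j + (q + l.length - min i j)) % l.length := Nat.add_mod_mod _ _ _
            _ = (q + d + l.length) % l.length := by congr 1; omega
            _ = (q + d) % l.length := Nat.add_mod_right _ l.length
        rw [← e2, ← a1, e1]
      by_cases hcase : m < max i j
      · have hrotmm : rotAt l (min i j) = rotAt l (max i j) := by
          apply lists_eq_of_getD (by rw [rot_length, rot_length])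
          intro u hu
          rw [rot_length] at hu
          rw [rot_getD l (by omega) hu, rot_getD l (by omega) hu]
          exact hmm u hu
        by_cases hmi : m = i
        · rcases Nat.lt_or_ge i j with hij' | hij'
          · omega
          · exfalso
            have h3 := hm.2.2 (min i j) (by omega)
            have : rotAt l (min i j) = rotAt l m := by
              rw [hrotmm]; congr 1; omega
            rw [this] at h3
            exact lt_irrefl _ h3
        · by_cases hmj : m = j
          · rcases Nat.lt_or_ge j i with hij' | hij'
            · omega
            · exfalso
              have h3 := hm.2.2 (min i j) (by omega)
              have : rotAt l (min i j) = rotAt l m := by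
                rw [hrotmm]; congr 1; omega
              rw [this] at h3
              exact lt_irrefl _ h3
          · exact absurd (hD m hcase hm.1 hmi hmj) hnb
      · exfalso
        have hdm : d ≤ m := by omega
        have hrot : rotAt l (m - d) = rotAt l m := by
          apply lists_eq_of_getD (by rw [rot_length, rot_length])
          intro u hu
          rw [rot_length] at hu
          rw [rot_getD l (by omega) hu, rot_getD l hm.1 hu]
          have e : m + u = (m - d + u) + d := by omega
          rw [e, hshift]
        have h3 := hm.2.2 (m - d) (by omega)
        rw [hrot] at h3
        exact lt_irrefl _ h3
    · -- j ≥ n: the answer is i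
      have : min i j = i := by omega
      rw [this]
      by_contra hne'
      exact hnb (hD m (by omega) hm.1 (fun he => hne' (by omega)) (by omega))
  · -- i ≥ n: the answer is j
    have : min i j = j := by omega
    rw [this]
    by_contra hne'
    exact hnb (hD m (by omega) hm.1 (by omega) (fun he => hne' (by omega)))

-- the main Booth correctness theorem
lemma boothLoop_least (l : List Char) (hn : 0 < l.length) :
    ∀ fuel i j k, 3 * l.length - (i + j + k) < fuel → BInv l i j k →
      LeastRot l (boothLoop (l ++ l) l.length fuel i j k) := by
  intro fuel
  induction fuel with
  | zero =>
    intro i j k hle _hinv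
    exact absurd hle (by omega)
  | succ N ih =>
    intro i j k hle hinv
    rw [boothLoop]
    by_cases hcond : i < l.length ∧ j < l.length ∧ k < l.length
    · rw [if_pos hcond]
      obtain ⟨hi, hj, hk⟩ := hcond
      obtain ⟨hne, hmin, hagree, hD⟩ := hinv
      rw [getD_append_self l (i + k) (by omega), getD_append_self l (j + k) (by omega)]
      set x := cAt l (i + k) with hx
      set y := cAt l (j + k) with hy
      show LeastRot l (if pvOrd x - pvOrd y = 0 then _ else _)
      by_cases h0 : pvOrd x - pvOrd y = 0
      · rw [if_pos h0]
        have hxy : x = y := char_eq_of_toNat_eq (by simp [pvOrd] at h0; omega)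
        apply ih _ _ _ (by omega)
        refine ⟨hne, hmin, ?_, hD⟩
        intro t ht
        rcases Nat.lt_or_ge t k with h' | h'
        · exact hagree t h'
        · have het : t = k := by omega
          subst het
          rw [← hx, ← hy]
          exact hxy
      · rw [if_neg h0]
        by_cases h1 : pvOrd x - pvOrd y > 0
        · rw [if_pos h1]
          have hyx : cAt l (j + k) < cAt l (i + k) := by
            rw [← hx, ← hy, char_lt_iff]
            simp [pvOrd] at h1
            omega
          have helim := elim_block l hn hk hagree hyx
          by_cases heq : i + k + 1 = j
          · rw [if_pos heq]
            apply ih _ _ _ (by omega)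
            refine ⟨by omega, by omega, fun t ht => absurd ht (Nat.not_lt_zero t), ?_⟩
            intro p hp hpn hp1 hp2
            rcases Nat.lt_or_ge p i with hpi | hpi
            · exact hD p (by omega) hpn (by omega) (by omega)
            · have := helim (p - i) (by omega) (by omega)
              rwa [Nat.add_sub_cancel' hpi] at this
          · rw [if_neg heq]
            apply ih _ _ _ (by omega)
            refine ⟨by omega, by omega, fun t ht => absurd ht (Nat.not_lt_zero t), ?_⟩
            intro p hp hpn hp1 hp2
            rcases Nat.lt_or_ge p i with hpi | hpi
            · exact hD p (by omega) hpn (by omega) hp2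
            · rcases Nat.lt_or_ge (i + k) p with hpk | hpk
              · exact hD p (by omega) hpn (by omega) hp2
              · have := helim (p - i) (by omega) (by omega)
                rwa [Nat.add_sub_cancel' hpi] at this
        · rw [if_neg h1]
          have hxy : cAt l (i + k) < cAt l (j + k) := by
            rw [← hx, ← hy, char_lt_iff]
            simp [pvOrd] at h0 h1
            omega
          have helim := elim_block l hn (a := j) (b := i) hk (fun t ht => (hagree t ht).symm) hxy
          by_cases heq : i = j + k + 1
          · rw [if_pos heq]
            apply ih _ _ _ (by omega)
            refine ⟨by omega, by omega, fun t ht => absurd ht (Nat.not_lt_zero t), ?_⟩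
            intro p hp hpn hp1 hp2
            rcases Nat.lt_or_ge p j with hpj | hpj
            · exact hD p (by omega) hpn (by omega) (by omega)
            · have := helim (p - j) (by omega) (by omega)
              rwa [Nat.add_sub_cancel' hpj] at this
          · rw [if_neg heq]
            apply ih _ _ _ (by omega)
            refine ⟨by omega, by omega, fun t ht => absurd ht (Nat.not_lt_zero t), ?_⟩
            intro p hp hpn hp1 hp2
            rcases Nat.lt_or_ge p j with hpj | hpj
            · exact hD p (by omega) hpn hp1 (by omega)
            · rcases Nat.lt_or_ge (j + k) p with hpk | hpk
              · exact hD p (by omega) hpn hp1 (by omega)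
              · have := helim (p - j) (by omega) (by omega)
                rwa [Nat.add_sub_cancel' hpj] at this
    · rw [if_neg hcond]
      exact booth_exit l hn hinv hcond

lemma min_rep_least (l : List Char) (hn : 0 < l.length) :
    LeastRot l (minimum_representation l) := by
  unfold minimum_representation
  apply boothLoop_least l hn (3 * l.length + 1) 0 1 0 (by omega)
  refine ⟨by omega, by omega, fun t ht => absurd ht (Nat.not_lt_zero t), ?_⟩
  intro p hp hpn hp0 hp1
  exact absurd (by omega : p = 0) hp0

lemma min_rep_zero_iff (l : List Char) (hn : 0 < l.length) :
    minimum_representation l = 0 ↔ l = minRot l := by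
  have hL := min_rep_least l hn
  constructor
  · intro h
    rw [h] at hL
    apply le_antisymm
    · rcases minRot_mem l with hm | ⟨i, hi, hm⟩
      · rw [hm]
      · rw [hm]
        have := hL.2.1 i hi
        rwa [rot_zero] at this
    · have := minRot_le l hn
      rwa [rot_zero] at this
  · intro h
    apply leastRot_unique hL
    refine ⟨hn, ?_, fun q hq => absurd hq (Nat.not_lt_zero q)⟩
    intro p hp
    rw [rot_zero]
    exact le_trans (le_of_eq h) (minRot_le l hp)

lemma minRot_eq_rot_least {l : List Char} {m : Nat} (hn : 0 < l.length) (h : LeastRot l m) :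
    minRot l = rotAt l m := by
  apply le_antisymm
  · exact minRot_le l h.1
  · rcases minRot_mem l with hm | ⟨i, hi, hm⟩
    · rw [hm]
      have := h.2.1 0 hn
      rwa [rot_zero] at this
    · rw [hm]
      exact h.2.1 i hi

lemma cmpLoop_drop (l rs : List Char) (hlen : rs.length = l.length) {rx : Nat}
    (hrx : rx < l.length) :
    ∀ fuel i, i ≤ l.length → l.length - i ≤ fuel →
      cmpLoop (l ++ l) (rs ++ rs) 0 rx l.length fuel i = lexLe (l.drop i) ((rotAt rs rx).drop i) := by
  intro fuel
  induction fuel with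
  | zero =>
    intro i hi he
    have hieq : i = l.length := by omega
    subst hieq
    rw [List.drop_eq_nil_of_le (le_refl _), List.drop_eq_nil_of_le (by rw [rot_length, hlen])]
    simp [cmpLoop, lexLe, lexLt]
  | succ d ihd =>
    intro i hi he
    by_cases hilt : i < l.length
    · rw [cmpLoop, if_pos hilt]
      have e1 : (l ++ l).getD (i + 0) ' ' = l.getD i ' ' := by
        rw [Nat.add_zero]
        exact List.getD_append _ _ _ _ hilt
      have e2 : (rs ++ rs).getD (i + rx) ' ' = (rotAt rs rx).getD i ' ' := by
        rw [getD_append_self rs _ (by omega)]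
        rw [rot_getD rs (by omega) (by omega)]
        exact cAt_congr_mod rs (by rw [Nat.add_comm])
      rw [e1, e2]
      have hd1 : l.drop i = l.getD i ' ' :: l.drop (i + 1) := by
        rw [List.drop_eq_getElem_cons hilt, List.getD_eq_getElem _ _ hilt]
      have hd2 : (rotAt rs rx).drop i = (rotAt rs rx).getD i ' ' :: (rotAt rs rx).drop (i + 1) := by
        have hir : i < (rotAt rs rx).length := by rw [rot_length, hlen]; omega
        rw [List.drop_eq_getElem_cons hir, List.getD_eq_getElem _ _ hir]
      rw [hd1, hd2]
      set a := l.getD i ' ' with ha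
      set b := (rotAt rs rx).getD i ' ' with hb
      show (if pvOrd a - pvOrd b > 0 then _ else _) = _
      simp only [lexLe, lexLt]
      rcases lt_trichotomy a b with h | h | h
      · have hab : a.toNat < b.toNat := (char_lt_iff a b).mp h
        rw [if_neg (show ¬(pvOrd a - pvOrd b > 0) by simp [pvOrd]; omega)]
        rw [if_pos (show pvOrd a - pvOrd b < 0 by simp [pvOrd]; omega)]
        rw [if_neg (show ¬(b < a) from (lt_asymm h)), if_pos h]
        simp
      · rw [← h]
        rw [if_neg (show ¬(pvOrd a - pvOrd a > 0) by simp [pvOrd])]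
        rw [if_neg (show ¬(pvOrd a - pvOrd a < 0) by simp [pvOrd])]
        have := ihd (i + 1) (by omega) (by omega)
        rw [this]
        simp [lexLe]
      · have hab : b.toNat < a.toNat := (char_lt_iff b a).mp h
        rw [if_pos (show pvOrd a - pvOrd b > 0 by simp [pvOrd]; omega)]
        rw [if_pos h]
        simp
    · have hieq : i = l.length := by omega
      subst hieq
      rw [List.drop_eq_nil_of_le (le_refl _), List.drop_eq_nil_of_le (by rw [rot_length, hlen])]
      simp [cmpLoop, lexLe, lexLt]

-- ===== VERDICT (by name: the statement is the Claim_ definition above) =====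
theorem check_minimum_spec : Claim_equal_check_minimum := by
  intro s _
  unfold Spec_check_minimum check_minimum check_minimum_alt
  by_cases h0 : s.toList.length = 0
  · have hnil : s.toList = [] := List.eq_nil_iff_length_eq_zero.mpr h0
    simp [hnil, minimum_representation, boothLoop, cmpLoop]
  · have hn : 0 < s.toList.length := by omega
    by_cases hx : minimum_representation s.toList = 0
    · have hEq : s.toList = minRot s.toList := (min_rep_zero_iff s.toList hn).mp hx
      have hlen : s.toList.reverse.length = s.toList.length := List.length_reverse
      have hnr : 0 < s.toList.reverse.length := by omega
      have hLr := min_rep_least s.toList.reverse hnr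
      have hrx : minimum_representation s.toList.reverse < s.toList.length := by
        rw [← hlen]; exact hLr.1
      simp only [hx, ne_eq, not_true_eq_false, if_false]
      rw [cmpLoop_drop s.toList s.toList.reverse hlen hrx s.toList.length 0 (by omega) (by omega)]
      rw [if_neg h0, if_neg (show ¬(s.toList ≠ minRot s.toList) by simpa using hEq)]
      simp only [List.drop_zero]
      rw [minRot_eq_rot_least hnr hLr]
    · have hne : s.toList ≠ minRot s.toList := fun he => hx ((min_rep_zero_iff s.toList hn).mpr he)
      have hs : s ≠ "" := fun he => h0 (by simp [he])
      simp [hx, hne, hs]
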